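-- pv_equiv track=rewrite | github.com/alexisiddiqui/JAX-ENT | jaxent/examples/combined_fixed_effects/plot_kendalls_combined.py | get_metric_order
-- ===== SOURCE A (Python) =====
-- def get_metric_order(metrics):
--     g1, g2, g3, g4 = [], [], [], []
--     for m in metrics:
--         m_lower = str(m).lower()
--         if 'loss' in m_lower: g1.append(m)
--         elif 'mse' in m_lower: g2.append(m)
--         elif 'kl' in m_lower or 'work' in m_lower: g3.append(m)
--         else: g4.append(m)
--     return sorted(g1) + sorted(g2) + sorted(g3) + sorted(g4)
-- ===== SOURCE B (Python) =====
-- def get_metric_order(metrics):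
--     def prio(m):
--         m_lower = str(m).lower()
--         if 'loss' in m_lower:
--             return 0
--         if 'mse' in m_lower:
--             return 1
--         if 'kl' in m_lower or 'work' in m_lower:
--             return 2
--         return 3
--     return sorted(metrics, key=lambda m: (prio(m), m))
-- ===== Notes on version B (the rewrite author's own statement) =====
-- stated objective: idiomatic
-- what changed: Replaces the four explicit bucket lists and four separate sorts with a single stable keyed sort on the tuple (priority, name), where priority reproduces the if/elif keyword classification.
import Mathlib
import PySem

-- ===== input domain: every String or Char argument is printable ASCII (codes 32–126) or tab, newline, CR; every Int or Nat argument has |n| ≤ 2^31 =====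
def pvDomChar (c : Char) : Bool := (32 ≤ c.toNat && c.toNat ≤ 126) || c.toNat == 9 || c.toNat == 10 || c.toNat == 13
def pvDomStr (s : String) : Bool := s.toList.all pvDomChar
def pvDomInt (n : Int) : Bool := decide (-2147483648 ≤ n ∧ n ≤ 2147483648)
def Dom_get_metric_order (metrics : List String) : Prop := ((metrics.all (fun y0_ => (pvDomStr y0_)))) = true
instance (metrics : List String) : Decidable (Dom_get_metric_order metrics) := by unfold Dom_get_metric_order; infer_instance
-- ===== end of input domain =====

-- B replaces A's four bucket lists and four sorts by one stable keyed sort on (priority, name); same result, more idiomatic.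

-- ===== PORT A =====
-- A's loop: one pass appending each metric to one of four lists, then concatenating the four sorted lists.
def get_metric_order (metrics : List String) : List String :=
  let g := metrics.foldl
    (fun (g : List String × List String × List String × List String) m =>
      let m_lower := PySem.Str.lower m
      if PySem.Str.isIn "loss" m_lower then (g.1 ++ [m], g.2.1, g.2.2.1, g.2.2.2)
      else if PySem.Str.isIn "mse" m_lower then (g.1, g.2.1 ++ [m], g.2.2.1, g.2.2.2)
      else if PySem.Str.isIn "kl" m_lower || PySem.Str.isIn "work" m_lower then
        (g.1, g.2.1, g.2.2.1 ++ [m], g.2.2.2)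
      else (g.1, g.2.1, g.2.2.1, g.2.2.2 ++ [m]))
    ([], [], [], [])
  PySem.List.sorted g.1 (fun x => x) false ++ PySem.List.sorted g.2.1 (fun x => x) false ++
    PySem.List.sorted g.2.2.1 (fun x => x) false ++ PySem.List.sorted g.2.2.2 (fun x => x) false

-- ===== PORT B =====
-- B's helper prio(m): the same keyword precedence as A's if/elif chain, as a numeric key.
def pvPrio (m : String) : Int :=
  let m_lower := PySem.Str.lower m
  if PySem.Str.isIn "loss" m_lower then 0
  else if PySem.Str.isIn "mse" m_lower then 1
  else if PySem.Str.isIn "kl" m_lower || PySem.Str.isIn "work" m_lower then 2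
  else 3

def get_metric_order_alt (metrics : List String) : List String :=
  PySem.List.sorted2 metrics pvPrio (fun m => m) false

-- ===== PRECONDITION & SPEC =====
def Spec_get_metric_order (metrics : List String) (out : List String) : Prop := out = get_metric_order_alt metrics
instance (metrics : List String) (out : List String) : Decidable (Spec_get_metric_order metrics out) := by unfold Spec_get_metric_order; infer_instance

-- ===== CLAIM (what is proved, stated in full; the proofs are below) =====
def Claim_equal_get_metric_order : Prop := ∀ (metrics : List String), Dom_get_metric_order metrics → Spec_get_metric_order metrics (get_metric_order metrics)

-- ===== LEMMAS AND PROOFS =====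

-- the comparison sorted2 uses for key (pvPrio m, m): strict lexicographic order
def pvLexlt (x y : String) : Bool :=
  decide (pvPrio x < pvPrio y) || (!decide (pvPrio y < pvPrio x) && decide (x < y))

theorem pvLexlt_of_lt {x y : String} (h : pvPrio x < pvPrio y) : pvLexlt x y = true := by
  simp [pvLexlt, h]

theorem pvLexlt_of_gt {x y : String} (h : pvPrio y < pvPrio x) : pvLexlt x y = false := by
  simp [pvLexlt, h]; omega

theorem pvLexlt_of_eq {x y : String} (h : pvPrio x = pvPrio y) :
    pvLexlt x y = decide (x < y) := by
  simp [pvLexlt, h]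

theorem insertBy_skip {α : Type} (b : α → α → Bool) (x : α) (L R : List α)
    (h : ∀ y ∈ L, b x y = false) :
    PySem.List.insertBy b x (L ++ R) = L ++ PySem.List.insertBy b x R := by
  induction L with
  | nil => simp
  | cons y ys ih =>
    have hy : b x y = false := h y (by simp)
    simp [PySem.List.insertBy, hy, ih (fun z hz => h z (by simp [hz]))]

theorem insertBy_agree {α : Type} (b b' : α → α → Bool) (x : α) (M R : List α)
    (hM : ∀ y ∈ M, b x y = b' x y) (hR : ∀ y ∈ R, b x y = true) :
    PySem.List.insertBy b x (M ++ R) = PySem.List.insertBy b' x M ++ R := by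
  induction M with
  | nil =>
    simp only [List.nil_append, PySem.List.insertBy]
    cases R with
    | nil => rfl
    | cons r rs => simp [PySem.List.insertBy, hR r (by simp)]
  | cons y ys ih =>
    have hy := hM y (by simp)
    by_cases hb : b' x y = true
    · simp [PySem.List.insertBy, hy, hb]
    · simp only [Bool.not_eq_true] at hb
      simp [PySem.List.insertBy, hy, hb, ih (fun z hz => hM z (by simp [hz]))]

-- A's accumulator fold computes the four priority filters
theorem foldA_eq_filters (xs : List String) (g1 g2 g3 g4 : List String) :
    xs.foldl
      (fun (g : List String × List String × List String × List String) m =>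
        let m_lower := PySem.Str.lower m
        if PySem.Str.isIn "loss" m_lower then (g.1 ++ [m], g.2.1, g.2.2.1, g.2.2.2)
        else if PySem.Str.isIn "mse" m_lower then (g.1, g.2.1 ++ [m], g.2.2.1, g.2.2.2)
        else if PySem.Str.isIn "kl" m_lower || PySem.Str.isIn "work" m_lower then
          (g.1, g.2.1, g.2.2.1 ++ [m], g.2.2.2)
        else (g.1, g.2.1, g.2.2.1, g.2.2.2 ++ [m]))
      (g1, g2, g3, g4)
    = (g1 ++ xs.filter (fun m => pvPrio m == 0), g2 ++ xs.filter (fun m => pvPrio m == 1),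
       g3 ++ xs.filter (fun m => pvPrio m == 2), g4 ++ xs.filter (fun m => pvPrio m == 3)) := by
  induction xs generalizing g1 g2 g3 g4 with
  | nil => simp
  | cons m xs ih =>
    by_cases h1 : PySem.Str.isIn "loss" (PySem.Str.lower m) = true
    · have hp : pvPrio m = 0 := by simp only [pvPrio]; rw [if_pos h1]
      simp only [List.foldl_cons, List.filter_cons, h1, hp, eq_self_iff_true, if_true]
      rw [ih]
      simp
    · rw [Bool.not_eq_true] at h1
      by_cases h2 : PySem.Str.isIn "mse" (PySem.Str.lower m) = true
      · have hp : pvPrio m = 1 := by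
          simp only [pvPrio]; rw [if_neg (by rw [h1]; exact Bool.false_ne_true), if_pos h2]
        simp only [List.foldl_cons, List.filter_cons, h1, h2, hp, Bool.false_eq_true,
          eq_self_iff_true, if_true, if_false]
        rw [ih]
        simp
      · rw [Bool.not_eq_true] at h2
        by_cases h3 : (PySem.Str.isIn "kl" (PySem.Str.lower m) ||
            PySem.Str.isIn "work" (PySem.Str.lower m)) = true
        · have hp : pvPrio m = 2 := by
            simp only [pvPrio]; rw [if_neg (by rw [h1]; exact Bool.false_ne_true), if_neg (by rw [h2]; exact Bool.false_ne_true), if_pos h3]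
          simp only [List.foldl_cons, List.filter_cons, h1, h2, h3, hp, Bool.false_eq_true,
            eq_self_iff_true, if_true, if_false]
          rw [ih]
          simp
        · rw [Bool.not_eq_true] at h3
          have hp : pvPrio m = 3 := by
            simp only [pvPrio]; rw [if_neg (by rw [h1]; exact Bool.false_ne_true), if_neg (by rw [h2]; exact Bool.false_ne_true),
              if_neg (by rw [h3]; exact Bool.false_ne_true)]
          simp only [List.foldl_cons, List.filter_cons, h1, h2, h3, hp, Bool.false_eq_true,
            eq_self_iff_true, if_true, if_false]
          rw [ih]
          simp

theorem prio_cases (m : String) :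
    pvPrio m = 0 ∨ pvPrio m = 1 ∨ pvPrio m = 2 ∨ pvPrio m = 3 := by
  simp only [pvPrio]; split_ifs <;> simp

theorem mem_sorted_filter {x : String} {xs : List String} {k : Int}
    (hx : x ∈ PySem.List.sorted (xs.filter (fun m => pvPrio m == k)) (fun y => y) false) :
    pvPrio x = k := by
  rw [PySem.List.mem_sorted] at hx
  have := List.of_mem_filter hx
  simpa using this

-- main invariant: the single keyed sort equals the concatenation of the four sorted buckets
theorem sorted2_eq_buckets (xs : List String) :
    PySem.List.sorted2 xs pvPrio (fun m => m) false
    = PySem.List.sorted (xs.filter (fun m => pvPrio m == 0)) (fun y => y) false ++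
      PySem.List.sorted (xs.filter (fun m => pvPrio m == 1)) (fun y => y) false ++
      PySem.List.sorted (xs.filter (fun m => pvPrio m == 2)) (fun y => y) false ++
      PySem.List.sorted (xs.filter (fun m => pvPrio m == 3)) (fun y => y) false := by
  induction xs using List.reverseRecOn with
  | nil => rfl
  | append_singleton xs x ih =>
    have hstep : PySem.List.sorted2 (xs ++ [x]) pvPrio (fun m => m) false
        = PySem.List.insertBy pvLexlt x (PySem.List.sorted2 xs pvPrio (fun m => m) false) := by
      unfold PySem.List.sorted2
      rw [List.foldl_append]
      rfl
    have hsortstep : ∀ (ys : List String),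
        PySem.List.sorted (ys ++ [x]) (fun y => y) false
        = PySem.List.insertBy (fun a b => decide (a < b)) x
            (PySem.List.sorted ys (fun y => y) false) := by
      intro ys
      rw [PySem.List.sorted_eq_foldl_insertBy, PySem.List.sorted_eq_foldl_insertBy,
        List.foldl_append]
      rfl
    have hfe : ∀ k : Int, pvPrio x ≠ k → (xs ++ [x]).filter (fun m => pvPrio m == k)
        = xs.filter (fun m => pvPrio m == k) := by
      intro k hk; rw [List.filter_append]; simp [List.filter_cons, hk]
    have hfeq : ∀ k : Int, pvPrio x = k → (xs ++ [x]).filter (fun m => pvPrio m == k)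
        = xs.filter (fun m => pvPrio m == k) ++ [x] := by
      intro k hk; rw [List.filter_append]; simp [List.filter_cons, hk]
    set S0 := PySem.List.sorted (xs.filter (fun m => pvPrio m == 0)) (fun y => y) false with hS0
    set S1 := PySem.List.sorted (xs.filter (fun m => pvPrio m == 1)) (fun y => y) false with hS1
    set S2 := PySem.List.sorted (xs.filter (fun m => pvPrio m == 2)) (fun y => y) false with hS2
    set S3 := PySem.List.sorted (xs.filter (fun m => pvPrio m == 3)) (fun y => y) false with hS3
    have hm0 : ∀ y ∈ S0, pvPrio y = 0 := fun y hy => mem_sorted_filter (hS0 ▸ hy)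
    have hm1 : ∀ y ∈ S1, pvPrio y = 1 := fun y hy => mem_sorted_filter (hS1 ▸ hy)
    have hm2 : ∀ y ∈ S2, pvPrio y = 2 := fun y hy => mem_sorted_filter (hS2 ▸ hy)
    have hm3 : ∀ y ∈ S3, pvPrio y = 3 := fun y hy => mem_sorted_filter (hS3 ▸ hy)
    rw [hstep, ih]
    rcases prio_cases x with hp | hp | hp | hp
    · rw [hfeq 0 hp, hfe 1 (by omega), hfe 2 (by omega), hfe 3 (by omega),
        hsortstep, ← hS0, ← hS1, ← hS2, ← hS3]
      rw [List.append_assoc, List.append_assoc,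
        insertBy_agree pvLexlt (fun a b => decide (a < b)) x S0 (S1 ++ (S2 ++ S3))
          (fun y hy => by rw [pvLexlt_of_eq (by rw [hp, hm0 y hy])])
          (fun y hy => by
            rcases List.mem_append.1 hy with hy | hy
            · exact pvLexlt_of_lt (by rw [hp, hm1 y hy]; norm_num)
            · rcases List.mem_append.1 hy with hy | hy
              · exact pvLexlt_of_lt (by rw [hp, hm2 y hy]; norm_num)
              · exact pvLexlt_of_lt (by rw [hp, hm3 y hy]; norm_num))]
      simp [List.append_assoc]
    · rw [hfe 0 (by omega), hfeq 1 hp, hfe 2 (by omega), hfe 3 (by omega),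
        hsortstep, ← hS0, ← hS1, ← hS2, ← hS3]
      rw [List.append_assoc, List.append_assoc,
        insertBy_skip pvLexlt x S0 (S1 ++ (S2 ++ S3))
          (fun y hy => pvLexlt_of_gt (by rw [hp, hm0 y hy]; norm_num))]
      rw [insertBy_agree pvLexlt (fun a b => decide (a < b)) x S1 (S2 ++ S3)
          (fun y hy => by rw [pvLexlt_of_eq (by rw [hp, hm1 y hy])])
          (fun y hy => by
            rcases List.mem_append.1 hy with hy | hy
            · exact pvLexlt_of_lt (by rw [hp, hm2 y hy]; norm_num)
            · exact pvLexlt_of_lt (by rw [hp, hm3 y hy]; norm_num))]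
      simp [List.append_assoc]
    · rw [hfe 0 (by omega), hfe 1 (by omega), hfeq 2 hp, hfe 3 (by omega),
        hsortstep, ← hS0, ← hS1, ← hS2, ← hS3]
      rw [List.append_assoc, List.append_assoc,
        insertBy_skip pvLexlt x S0 (S1 ++ (S2 ++ S3))
          (fun y hy => pvLexlt_of_gt (by rw [hp, hm0 y hy]; norm_num))]
      rw [insertBy_skip pvLexlt x S1 (S2 ++ S3)
          (fun y hy => pvLexlt_of_gt (by rw [hp, hm1 y hy]; norm_num))]
      rw [insertBy_agree pvLexlt (fun a b => decide (a < b)) x S2 S3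
          (fun y hy => by rw [pvLexlt_of_eq (by rw [hp, hm2 y hy])])
          (fun y hy => pvLexlt_of_lt (by rw [hp, hm3 y hy]; norm_num))]
      simp [List.append_assoc]
    · have hagree : PySem.List.insertBy pvLexlt x S3
          = PySem.List.insertBy (fun a b => decide (a < b)) x S3 := by
        have h := insertBy_agree pvLexlt (fun a b => decide (a < b)) x S3 []
          (fun y hy => by rw [pvLexlt_of_eq (by rw [hp, hm3 y hy])]) (by simp)
        simpa using h
      rw [hfe 0 (by omega), hfe 1 (by omega), hfe 2 (by omega), hfeq 3 hp,
        hsortstep, ← hS0, ← hS1, ← hS2, ← hS3]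
      rw [List.append_assoc, List.append_assoc,
        insertBy_skip pvLexlt x S0 (S1 ++ (S2 ++ S3))
          (fun y hy => pvLexlt_of_gt (by rw [hp, hm0 y hy]; norm_num))]
      rw [insertBy_skip pvLexlt x S1 (S2 ++ S3)
          (fun y hy => pvLexlt_of_gt (by rw [hp, hm1 y hy]; norm_num))]
      rw [insertBy_skip pvLexlt x S2 S3
          (fun y hy => pvLexlt_of_gt (by rw [hp, hm2 y hy]; norm_num))]
      rw [hagree]
      simp [List.append_assoc]

-- ===== VERDICT (by name: the statement is the Claim_ definition above) =====
theorem get_metric_order_spec : Claim_equal_get_metric_order := by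
  intro metrics _
  unfold Spec_get_metric_order get_metric_order get_metric_order_alt
  rw [foldA_eq_filters, sorted2_eq_buckets]
  simp [List.append_assoc]
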